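-- pv_equiv track=rewrite | github.com/HimanshuNankani/Python-Programs | switchGame.py | switchBulb
-- ===== SOURCE A (Python) =====
-- def switchBulb(testList,n):
--     for i in range(1,n+1):
--         for m in range(1,n+1):
--             if m%i==0:
--                 testList[m-1] = False if testList[m-1] else True
--
--     bulbsOn=[]
--
--     for j in range(n):
--         if testList[j]:
--             bulbsOn.append(j+1)
--
--     return bulbsOn
-- ===== SOURCE B (Python) =====
-- def switchBulb(testList, n):
--     # Bulb m is toggled once per divisor of m, so it flips iff m is a perfect
--     # square; one O(n) pass, tracking the next square incrementally.
--     # Unlike A, this does not mutate testList in place (return value is the same).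
--     bulbsOn = []
--     r = 1
--     sq = 1
--     for m in range(1, n + 1):
--         if m == sq:
--             flipped = True
--             r += 1
--             sq = r * r
--         else:
--             flipped = False
--         if testList[m - 1] != flipped:
--             bulbsOn.append(m)
--     return bulbsOn
-- ===== Notes on version B (the rewrite author's own statement) =====
-- stated objective: faster
-- what changed: Replaces the O(n^2) double toggle loop by a single O(n) pass: a bulb ends up flipped iff its index is a perfect square (odd divisor count), recognised by incrementally tracking the next square.
import Mathlib
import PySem

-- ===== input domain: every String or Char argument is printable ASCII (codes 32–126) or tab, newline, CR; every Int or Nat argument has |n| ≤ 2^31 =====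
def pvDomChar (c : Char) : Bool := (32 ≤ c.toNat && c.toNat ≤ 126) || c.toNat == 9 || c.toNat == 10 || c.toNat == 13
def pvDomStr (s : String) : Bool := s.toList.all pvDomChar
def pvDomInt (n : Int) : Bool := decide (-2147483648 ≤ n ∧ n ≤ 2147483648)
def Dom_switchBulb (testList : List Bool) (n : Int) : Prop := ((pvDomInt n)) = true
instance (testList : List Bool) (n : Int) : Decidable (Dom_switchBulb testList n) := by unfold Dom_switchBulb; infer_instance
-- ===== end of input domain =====

-- B replaces A's O(n^2) double toggle loop by one pass that flips exactly the perfect-square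
-- bulbs (objective: faster). A mutates testList in place, B does not; the equivalence proved
-- here is about the RETURN value only.

-- ===== PORT A =====
def switchBulb (testList : List Bool) (n : Int) : List Int :=
  let ls := (PySem.List.pyRange 1 (n+1) 1).foldl (fun acc i =>
      (PySem.List.pyRange 1 (n+1) 1).foldl (fun acc2 m =>
        if PySem.Int.mod m i = 0 then
          PySem.List.pySetD acc2 (m-1)
            (if PySem.List.pyGetD acc2 (m-1) false then false else true)
        else acc2) acc) testList
  (PySem.List.pyRange 0 n 1).foldl (fun out j =>
    if PySem.List.pyGetD ls j false then out ++ [j+1] else out) []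

-- ===== PORT B =====
-- one step of B's loop body; (bulbsOn, r, sq) is the loop state
def altStep (testList : List Bool) (st : List Int × Int × Int) (m : Int) :
    List Int × Int × Int :=
  let p : Bool × Int × Int :=
    if m = st.2.2 then (true, st.2.1 + 1, (st.2.1 + 1) * (st.2.1 + 1))
    else (false, st.2.1, st.2.2)
  if PySem.List.pyGetD testList (m-1) false ≠ p.1 then (st.1 ++ [m], p.2.1, p.2.2)
  else (st.1, p.2.1, p.2.2)

def switchBulb_alt (testList : List Bool) (n : Int) : List Int :=
  ((PySem.List.pyRange 1 (n+1) 1).foldl (altStep testList) ([], 1, 1)).1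

-- ===== PRECONDITION & SPEC =====
-- Pre_ excludes exactly the inputs where Python A raises IndexError (n exceeds the list length).
def Pre_switchBulb (testList : List Bool) (n : Int) : Prop := n ≤ (testList.length : Int)
instance (testList : List Bool) (n : Int) : Decidable (Pre_switchBulb testList n) := by
  unfold Pre_switchBulb; infer_instance
def pvWitness_switchBulb : List Bool × Int := ([true, false, true, false, true], 5)
def Spec_switchBulb (testList : List Bool) (n : Int) (out : List Int) : Prop := out = switchBulb_alt testList n
instance (testList : List Bool) (n : Int) (out : List Int) : Decidable (Spec_switchBulb testList n out) := by unfold Spec_switchBulb; infer_instance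

-- ===== CLAIM (what is proved, stated in full; the proofs are below) =====
def Claim_equal_switchBulb : Prop := ∀ (testList : List Bool) (n : Int), Dom_switchBulb testList n → Pre_switchBulb testList n → Spec_switchBulb testList n (switchBulb testList n)

-- ===== LEMMAS AND PROOFS =====

def stepA (i : Int) (acc2 : List Bool) (m : Int) : List Bool :=
  if PySem.Int.mod m i = 0 then
    PySem.List.pySetD acc2 (m-1)
      (if PySem.List.pyGetD acc2 (m-1) false then false else true)
  else acc2


theorem switchBulb_eq (t : List Bool) (n : Int) :
    switchBulb t n =
      (PySem.List.pyRange 0 n 1).foldl (fun out j =>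
        if PySem.List.pyGetD
            ((PySem.List.pyRange 1 (n+1) 1).foldl
              (fun acc i => (PySem.List.pyRange 1 (n+1) 1).foldl (stepA i) acc) t)
            j false
        then out ++ [j+1] else out) [] := rfl

theorem getD_set_eq (l : List Bool) (i k : Nat) (v : Bool) (hi : i < l.length) :
    (l.set i v).getD k false = if i = k then v else l.getD k false := by
  simp only [List.getD_eq_getElem?_getD, List.getElem?_set, if_pos hi]
  split <;> simp

theorem stepA_length (i : Int) (acc : List Bool) (m : Int) :
    (stepA i acc m).length = acc.length := by
  unfold stepA; split
  · exact PySem.List.length_pySetD _ _ _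
  · rfl

theorem stepA_getD (i m : Int) (acc : List Bool) (k : Nat)
    (hm1 : 1 ≤ m) (hmle : m ≤ (acc.length : Int)) (_hk : k < acc.length) :
    (stepA i acc m).getD k false
      = if (decide (PySem.Int.mod m i = 0) && decide (m = (k:Int)+1)) = true
        then !(acc.getD k false) else acc.getD k false := by
  unfold stepA
  by_cases hmod : PySem.Int.mod m i = 0
  · rw [if_pos hmod, PySem.List.pySetD_of_nonneg _ _ (by omega),
      PySem.List.pyGetD_of_nonneg _ _ (by omega : (0:Int) ≤ m - 1),
      getD_set_eq _ _ _ _ (by omega)]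
    by_cases hm : m = (k:Int)+1
    · have : (m-1).toNat = k := by omega
      rw [if_pos this, this]
      have hmod' : PySem.Int.mod ((k:Int)+1) i = 0 := hm ▸ hmod
      simp [hmod', hm]
    · have : (m-1).toNat ≠ k := by omega
      rw [if_neg this]
      simp [hmod, hm]
  · rw [if_neg hmod]
    simp [hmod]

theorem inner_get (i : Int) :
    ∀ (L : List Int) (acc : List Bool) (k : Nat),
      (∀ m ∈ L, 1 ≤ m ∧ m ≤ (acc.length : Int)) → k < acc.length →
      (L.foldl (stepA i) acc).getD k false
        = xor (acc.getD k false)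
            (decide (Odd (L.countP (fun m =>
              decide (PySem.Int.mod m i = 0) && decide (m = (k:Int)+1))))) := by
  intro L
  induction L with
  | nil => intro acc k _ _; simp
  | cons m L ih =>
    intro acc k hmem hk
    have hm := hmem m (by simp)
    rw [List.foldl_cons, List.countP_cons,
      ih (stepA i acc m) k
        (by intro x hx; rw [stepA_length]; exact hmem x (by simp [hx]))
        (by rw [stepA_length]; exact hk),
      stepA_getD i m acc k hm.1 hm.2 hk]
    set c := L.countP (fun m => decide (PySem.Int.mod m i = 0) && decide (m = (k:Int)+1)) with hc
    by_cases hp : (decide (PySem.Int.mod m i = 0) && decide (m = (k:Int)+1)) = true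
    · rw [if_pos hp, if_pos hp]
      have hodd : decide (Odd (c + 1)) = !decide (Odd c) := by
        by_cases h : Odd c
        · simp [h, Nat.odd_add_one]
        · simp [h, Nat.odd_add_one]
      rw [hodd]
      cases acc.getD k false <;> cases hb : decide (Odd c) <;> simp
    · rw [if_neg hp, if_neg hp]
      simp

theorem stepA_foldl_length (i : Int) (L : List Int) :
    ∀ (acc : List Bool), (L.foldl (stepA i) acc).length = acc.length := by
  induction L with
  | nil => intro acc; rfl
  | cons m L ih =>
    intro acc
    rw [List.foldl_cons, ih, stepA_length]

theorem outer_get (L : List Int) :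
    ∀ (I : List Int) (acc : List Bool) (k : Nat),
      (∀ m ∈ L, 1 ≤ m ∧ m ≤ (acc.length : Int)) → k < acc.length →
      (I.foldl (fun acc i => L.foldl (stepA i) acc) acc).getD k false
        = xor (acc.getD k false)
            (decide (Odd (I.countP (fun i =>
              decide (Odd (L.countP (fun m =>
                decide (PySem.Int.mod m i = 0) && decide (m = (k:Int)+1)))))))) := by
  intro I
  induction I with
  | nil => intro acc k _ _; simp
  | cons i I ih =>
    intro acc k hmem hk
    rw [List.foldl_cons, List.countP_cons,
      ih (L.foldl (stepA i) acc) k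
        (by intro x hx; rw [stepA_foldl_length]; exact hmem x hx)
        (by rw [stepA_foldl_length]; exact hk),
      inner_get i L acc k hmem hk]
    set b := decide (Odd (L.countP (fun m =>
      decide (PySem.Int.mod m i = 0) && decide (m = (k:Int)+1)))) with hbdef
    set c := I.countP (fun i =>
      decide (Odd (L.countP (fun m =>
        decide (PySem.Int.mod m i = 0) && decide (m = (k:Int)+1))))) with hcdef
    by_cases hb : b = true
    · rw [if_pos hb, hb]
      have hodd : decide (Odd (c + 1)) = !decide (Odd c) := by
        by_cases h : Odd c <;> simp [h, Nat.odd_add_one]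
      rw [hodd]
      cases acc.getD k false <;> cases hc : decide (Odd c) <;> simp
    · rw [if_neg hb]
      have hb' : b = false := by revert hb; cases b <;> simp
      rw [hb']
      simp

def isSqB (m : Int) : Bool := decide (Nat.sqrt m.toNat * Nat.sqrt m.toNat = m.toNat)

theorem countP_and_eq (L : List Int) (A : Int → Bool) (v : Int) :
    L.countP (fun m => A m && decide (m = v)) = if A v then L.count v else 0 := by
  induction L with
  | nil => simp
  | cons a L ih =>
    rw [List.countP_cons]
    by_cases ha : a = v
    · subst ha
      by_cases hA : A a <;> simp [hA, ih]
    · simp [ha, ih]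

theorem countP_range_eq_card (N : Nat) (p : Nat → Bool) :
    (List.range N).countP p = ((Finset.range N).filter (fun j => p j = true)).card := by
  induction N with
  | zero => simp
  | succ n ih =>
    rw [List.range_succ, List.countP_append, Finset.range_add_one, Finset.filter_insert]
    by_cases h : p n = true
    · rw [if_pos h, Finset.card_insert_of_notMem (by simp)]
      simp [h, ih]
    · rw [if_neg h]
      simp [h, ih]


theorem card_filter_range_divisors (N K : Nat) (hK : 1 ≤ K) (hKN : K ≤ N) :
    ((Finset.range N).filter (fun j => (j+1) ∣ K)).card = K.divisors.card := by
  apply Finset.card_nbij' (fun j => j + 1) (fun d => d - 1)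
  · intro j hj
    simp only [Finset.coe_filter, Set.mem_setOf_eq, Finset.mem_range] at hj
    simp only [Finset.mem_coe, Nat.mem_divisors]
    exact ⟨hj.2, by omega⟩
  · intro d hd
    simp only [Finset.mem_coe, Nat.mem_divisors] at hd
    have h1 : 1 ≤ d := Nat.one_le_iff_ne_zero.mpr (by rintro rfl; exact hd.2 (Nat.eq_zero_of_zero_dvd hd.1))
    have h2 : d ≤ K := Nat.le_of_dvd (by omega) hd.1
    simp only [Finset.coe_filter, Set.mem_setOf_eq, Finset.mem_range]
    refine ⟨by omega, ?_⟩
    rw [Nat.sub_add_cancel h1]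
    exact hd.1
  · intro j hj
    simp only []
    omega
  · intro d hd
    simp only [Finset.mem_coe, Nat.mem_divisors] at hd
    have h1 : 1 ≤ d := Nat.one_le_iff_ne_zero.mpr (by rintro rfl; exact hd.2 (Nat.eq_zero_of_zero_dvd hd.1))
    simp only []
    omega

theorem even_card_no_fix (K : Nat) (hK : K ≠ 0) (T : Finset Nat)
    (hsub : ∀ d ∈ T, d ∣ K) (hmem : ∀ d ∈ T, K / d ∈ T)
    (hfix : ∀ d ∈ T, K / d ≠ d) : Even T.card := by
  have h : ∏ _x ∈ T, (-1 : ℤ) = 1 := by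
    apply Finset.prod_involution (g := fun d _ => K / d)
    · intro a _; norm_num
    · intro a ha _; exact hfix a ha
    · intro a ha; exact hmem a ha
    · intro a ha; exact Nat.div_div_self (hsub a ha) hK
  rw [Finset.prod_const] at h
  exact (neg_one_pow_eq_one_iff_even (by norm_num)).mp h

theorem odd_card_divisors (K : Nat) (hK : K ≠ 0) :
    Odd K.divisors.card ↔ Nat.sqrt K * Nat.sqrt K = K := by
  by_cases hsq : Nat.sqrt K * Nat.sqrt K = K
  · simp only [hsq, iff_true]
    obtain ⟨s, hsq'⟩ : ∃ s, s * s = K := ⟨Nat.sqrt K, hsq⟩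
    have hs0 : 0 < s := by
      rcases Nat.eq_zero_or_pos s with h0 | h0
      · exfalso; apply hK; rw [← hsq', h0]
      · exact h0
    have hKs : K / s = s := by rw [← hsq', Nat.mul_div_cancel_left _ hs0]
    have hsmem : s ∈ K.divisors := Nat.mem_divisors.mpr ⟨⟨s, hsq'.symm⟩, hK⟩
    have heven : Even (K.divisors.erase s).card := by
      apply even_card_no_fix K hK
      · intro d hd; exact (Nat.mem_divisors.mp (Finset.mem_of_mem_erase hd)).1
      · intro d hd
        have hdd := Nat.mem_divisors.mp (Finset.mem_of_mem_erase hd)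
        have hne := Finset.ne_of_mem_erase hd
        refine Finset.mem_erase.mpr ⟨?_, Nat.mem_divisors.mpr ⟨⟨d, (Nat.div_mul_cancel hdd.1).symm⟩, hK⟩⟩
        intro hKd
        have hinv := Nat.div_div_self hdd.1 hK
        rw [hKd, hKs] at hinv
        exact hne hinv.symm
      · intro d hd hfix
        have hdd := Nat.mem_divisors.mp (Finset.mem_of_mem_erase hd)
        have hne := Finset.ne_of_mem_erase hd
        apply hne
        have hdk : d * d = K := by
          have h := Nat.mul_div_cancel' hdd.1
          rw [hfix] at h; exact h
        have : d * d = s * s := by rw [hdk, hsq']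
        exact Nat.mul_self_inj.mp this
    have hcard := Finset.card_erase_add_one hsmem
    rcases heven with ⟨c, hc⟩
    exact ⟨c, by omega⟩
  · simp only [hsq, iff_false]
    intro hodd
    have heven : Even K.divisors.card := by
      apply even_card_no_fix K hK
      · intro d hd; exact (Nat.mem_divisors.mp hd).1
      · intro d hd
        have hdd := Nat.mem_divisors.mp hd
        exact Nat.mem_divisors.mpr ⟨⟨d, (Nat.div_mul_cancel hdd.1).symm⟩, hK⟩
      · intro d hd hfix
        have hdd := Nat.mem_divisors.mp hd
        apply hsq
        have hdk : d * d = K := by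
          have h := Nat.mul_div_cancel' hdd.1
          rw [hfix] at h; exact h
        rw [← hdk, Nat.sqrt_eq d]
    simp [Nat.even_iff, Nat.odd_iff] at heven hodd; omega

theorem A_get (t : List Bool) (n : Int) (k : Nat) (hpre : n ≤ (t.length : Int))
    (hk : (k:Int) < n) (hkl : k < t.length) :
    ((PySem.List.pyRange 1 (n+1) 1).foldl
        (fun acc i => (PySem.List.pyRange 1 (n+1) 1).foldl (stepA i) acc) t).getD k false
      = xor (t.getD k false) (isSqB ((k:Int)+1)) := by
  have hmem : ∀ m ∈ PySem.List.pyRange 1 (n+1) 1, 1 ≤ m ∧ m ≤ (t.length : Int) := by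
    intro m hm
    rw [PySem.List.mem_pyRange_one] at hm
    omega
  rw [outer_get (PySem.List.pyRange 1 (n+1) 1) (PySem.List.pyRange 1 (n+1) 1) t k hmem hkl]
  congr 1
  -- simplify the inner count: it is 1 iff i divides k+1
  have hinner : ∀ i : Int,
      (PySem.List.pyRange 1 (n+1) 1).countP (fun m =>
        decide (PySem.Int.mod m i = 0) && decide (m = (k:Int)+1))
      = if decide (PySem.Int.mod ((k:Int)+1) i = 0) then 1 else 0 := by
    intro i
    rw [countP_and_eq]
    have hcount : (PySem.List.pyRange 1 (n+1) 1).count ((k:Int)+1) = 1 :=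
      List.count_eq_one_of_mem (PySem.List.nodup_pyRange_one _ _)
        (PySem.List.mem_pyRange_one.mpr (by omega))
    rw [hcount]
  have hpred : (PySem.List.pyRange 1 (n+1) 1).countP (fun i =>
      decide (Odd ((PySem.List.pyRange 1 (n+1) 1).countP (fun m =>
        decide (PySem.Int.mod m i = 0) && decide (m = (k:Int)+1)))))
      = (PySem.List.pyRange 1 (n+1) 1).countP (fun i =>
          decide (PySem.Int.mod ((k:Int)+1) i = 0)) := by
    apply List.countP_congr
    intro i _
    rw [hinner i]
    by_cases h : PySem.Int.mod ((k:Int)+1) i = 0 <;> simp [h]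
  rw [hpred]
  -- turn the Int count into the Nat divisor count
  rw [PySem.List.pyRange_one 1 (n+1), List.countP_map]
  have hN : (n + 1 - 1).toNat = n.toNat := by omega
  rw [hN]
  have hconv : (List.range n.toNat).countP
        ((fun i => decide (PySem.Int.mod ((k:Int)+1) i = 0)) ∘ (fun j : Nat => 1 + (j:Int)))
      = (List.range n.toNat).countP (fun j => decide ((j+1) ∣ (k+1))) := by
    apply List.countP_congr
    intro j _
    simp only [Function.comp_apply, decide_eq_true_eq]
    rw [PySem.Int.mod_eq_zero_iff_dvd]
    constructor
    · intro h
      have h' : ((j:Int)+1) ∣ ((k:Int)+1) := by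
        have : (1 + (j:Int)) = ((j:Int)+1) := by ring
        rwa [this] at h
      exact_mod_cast h'
    · intro h
      have h' : ((j:Int)+1) ∣ ((k:Int)+1) := by exact_mod_cast h
      have : (1 + (j:Int)) = ((j:Int)+1) := by ring
      rwa [this]
  rw [hconv, countP_range_eq_card]
  have hcard := card_filter_range_divisors n.toNat (k+1) (by omega) (by omega)
  have hfix : ((Finset.range n.toNat).filter (fun j => decide ((j+1) ∣ (k+1)) = true)).card
      = ((Finset.range n.toNat).filter (fun j => (j+1) ∣ (k+1))).card := by
    congr 1
    apply Finset.filter_congr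
    intro j _
    simp
  rw [hfix, hcard]
  have hodd := odd_card_divisors (k+1) (by omega)
  unfold isSqB
  have htn : ((k:Int)+1).toNat = k + 1 := by omega
  rw [htn]
  simp only [decide_eq_decide]
  exact hodd

theorem isSqB_sq (a r : Int) (hr : 0 < r) (ha : a = r * r) : isSqB a = true := by
  unfold isSqB
  have h : a.toNat = r.toNat * r.toNat := by
    rw [ha, ← Int.toNat_mul] <;> omega
  rw [h, Nat.sqrt_eq]
  simp

theorem isSqB_nonsq (a r : Int) (h1 : 1 ≤ a) (hr : 0 < r)
    (hlow : (r-1)*(r-1) < a) (hhigh : a ≤ r*r) (hne : a ≠ r*r) : isSqB a = false := by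
  unfold isSqB
  simp only [decide_eq_false_iff_not]
  intro hcontra
  have hA : (a.toNat : Int) = a := Int.toNat_of_nonneg (by omega)
  have hR : (r.toNat : Int) = r := Int.toNat_of_nonneg (by omega)
  have hR1 : 1 ≤ r.toNat := by omega
  have hnat1 : a.toNat < r.toNat * r.toNat := by
    have h' : (a.toNat : Int) < (r.toNat : Int) * (r.toNat : Int) := by
      rw [hA, hR]
      exact lt_of_le_of_ne hhigh hne
    exact_mod_cast h'
  have hnat2 : (r.toNat - 1) * (r.toNat - 1) < a.toNat := by
    have h' : ((r.toNat - 1 : Nat) : Int) * ((r.toNat - 1 : Nat) : Int) < (a.toNat : Int) := by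
      rw [Nat.cast_sub hR1, hR, hA]
      exact hlow
    exact_mod_cast h'
  have hs : a.toNat.sqrt < r.toNat := by
    apply Nat.mul_self_lt_mul_self_iff.mp
    rw [hcontra]
    exact hnat1
  have hle : a.toNat.sqrt ≤ r.toNat - 1 := by omega
  have := Nat.mul_le_mul hle hle
  omega

theorem alt_inv (t : List Bool) (b : Int) : ∀ (g : Nat) (a r : Int) (out : List Int),
    g = (b - a).toNat → 1 ≤ a → 0 < r → (r-1)*(r-1) < a → a ≤ r*r →
    ((PySem.List.pyRange a b 1).foldl (altStep t) (out, r, r*r)).1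
      = out ++ (PySem.List.pyRange a b 1).filter
          (fun m => PySem.List.pyGetD t (m-1) false != isSqB m) := by
  intro g
  induction g with
  | zero =>
    intro a r out hg h1 hr hlow hhigh
    rw [PySem.List.pyRange_one_eq_nil (by omega)]
    simp
  | succ g ih =>
    intro a r out hg h1 hr hlow hhigh
    have hab : a < b := by omega
    rw [PySem.List.pyRange_one_cons hab, List.foldl_cons, List.filter_cons]
    by_cases ha : a = r*r
    · subst ha
      have hsq : isSqB (r*r) = true := isSqB_sq (r*r) r hr rfl
      have hinv1 : (r+1-1)*(r+1-1) < r*r + 1 := by nlinarith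
      have hinv2 : r*r + 1 ≤ (r+1)*(r+1) := by nlinarith
      cases hx : PySem.List.pyGetD t (r*r-1) false
      · have hstep : altStep t (out, r, r*r) (r*r) = (out ++ [r*r], r+1, (r+1)*(r+1)) := by
          simp [altStep, hx]
        rw [hstep, if_pos (by simp [hsq]),
          ih (r*r+1) (r+1) (out ++ [r*r]) (by omega) (by omega) (by omega) hinv1 hinv2]
        simp
      · have hstep : altStep t (out, r, r*r) (r*r) = (out, r+1, (r+1)*(r+1)) := by
          simp [altStep, hx]
        rw [hstep, if_neg (by simp [hsq]),
          ih (r*r+1) (r+1) out (by omega) (by omega) (by omega) hinv1 hinv2]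
    · have hsq : isSqB a = false := isSqB_nonsq a r h1 hr hlow hhigh ha
      cases hx : PySem.List.pyGetD t (a-1) false
      · have hstep : altStep t (out, r, r*r) a = (out, r, r*r) := by
          simp [altStep, ha, hx]
        rw [hstep, if_neg (by simp [hsq]),
          ih (a+1) r out (by omega) (by omega) (by omega) (by omega) (by omega)]
      · have hstep : altStep t (out, r, r*r) a = (out ++ [a], r, r*r) := by
          simp [altStep, ha, hx]
        rw [hstep, if_pos (by simp [hsq]),
          ih (a+1) r (out ++ [a]) (by omega) (by omega) (by omega) (by omega) (by omega)]
        simp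

-- ===== VERDICT =====
theorem switchBulb_spec : Claim_equal_switchBulb := by
  intro t n _ hpre
  unfold Pre_switchBulb at hpre
  unfold Spec_switchBulb
  have halt : switchBulb_alt t n
      = (PySem.List.pyRange 1 (n+1) 1).filter
          (fun m => PySem.List.pyGetD t (m-1) false != isSqB m) := by
    unfold switchBulb_alt
    have hinit : (([], 1, 1) : List Int × Int × Int) = ([], 1, (1:Int)*1) := by norm_num
    rw [hinit, alt_inv t (n+1) (n+1-1).toNat 1 1 [] rfl (by omega) (by omega) (by omega) (by omega)]
    simp
  rw [halt, switchBulb_eq, PySem.List.foldl_append_if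
    (fun j => PySem.List.pyGetD
      ((PySem.List.pyRange 1 (n+1) 1).foldl
        (fun acc i => (PySem.List.pyRange 1 (n+1) 1).foldl (stepA i) acc) t) j false)
    (fun j => j + 1)]
  set LS := (PySem.List.pyRange 1 (n+1) 1).foldl
      (fun acc i => (PySem.List.pyRange 1 (n+1) 1).foldl (stepA i) acc) t with hLS
  rw [PySem.List.pyRange_one 0 n, PySem.List.pyRange_one 1 (n+1)]
  have e1 : n - 0 = n := by ring
  have e2 : n + 1 - 1 = n := by ring
  rw [e1, e2, List.filter_map, List.filter_map, List.map_map]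
  have hfil : (List.range n.toNat).filter
      ((fun j => PySem.List.pyGetD LS j false) ∘ (fun k : Nat => 0 + (k:Int)))
      = (List.range n.toNat).filter
        ((fun m => PySem.List.pyGetD t (m-1) false != isSqB m) ∘ (fun k : Nat => 1 + (k:Int))) := by
    apply List.filter_congr
    intro k hk
    rw [List.mem_range] at hk
    simp only [Function.comp_apply]
    have ez : (0:Int) + (k:Int) = ((k:Int)) := by ring
    have eo : (1:Int) + (k:Int) - 1 = ((k:Int)) := by ring
    have eo2 : (1:Int) + (k:Int) = ((k:Int)) + 1 := by ring
    rw [ez, eo, eo2, PySem.List.pyGetD_natCast, hLS,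
      A_get t n k hpre (by omega) (by omega), PySem.List.pyGetD_natCast]
  rw [hfil, List.nil_append]
  apply List.map_congr_left
  intro k _
  simp only [Function.comp_apply]
  ring
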